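-- pv_equiv track=rewrite | github.com/venkatvi/llm_prep | mapreduce/practice_problems/compute_average.py | aggregate_per_user_scores
-- ===== SOURCE A (Python) =====
-- from typing import Tuple, Generator, List, Dict
-- from collections import defaultdict
--
-- def aggregate_per_user_scores(
--     scores: List[Tuple[str, int]]
-- ) -> Dict[str, List[int]]:
--     """
--     Aggregate scores by user name using direct approach.
--
--     Args:
--         scores: List of (user_name, score) tuples
--
--     Returns:
--         Dictionary mapping user names to lists of their scores
--     """
--     mapped_scores = defaultdict(list)
--     for score in scores:
--         name, val = score
--         mapped_scores[name].append(val)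
--     return dict(mapped_scores)
-- ===== SOURCE B (Python) =====
-- def aggregate_per_user_scores(scores):
--     """Aggregate scores by user name by repeated partitioning: take the first
--     remaining user's name, emit all of that user's scores in one filtering pass,
--     and drop that user's entries from the worklist; repeat until empty.
--     No hash-bucket accumulation; keys appear in first-occurrence order."""
--     result = {}
--     rest = scores
--     while rest:
--         name = rest[0][0]
--         result[name] = [v for n, v in rest if n == name]
--         rest = [(n, v) for n, v in rest if n != name]
--     return result
-- ===== Notes on version B (the rewrite author's own statement) =====
-- stated objective: alternative
-- what changed: Replaces the single-pass defaultdict hash-bucket accumulation with a worklist partition loop: repeatedly take the first remaining name, emit that user's scores by one filtering pass, and remove those entries from the worklist, so no dict accumulation or per-element bucket append occurs.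
import Mathlib
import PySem

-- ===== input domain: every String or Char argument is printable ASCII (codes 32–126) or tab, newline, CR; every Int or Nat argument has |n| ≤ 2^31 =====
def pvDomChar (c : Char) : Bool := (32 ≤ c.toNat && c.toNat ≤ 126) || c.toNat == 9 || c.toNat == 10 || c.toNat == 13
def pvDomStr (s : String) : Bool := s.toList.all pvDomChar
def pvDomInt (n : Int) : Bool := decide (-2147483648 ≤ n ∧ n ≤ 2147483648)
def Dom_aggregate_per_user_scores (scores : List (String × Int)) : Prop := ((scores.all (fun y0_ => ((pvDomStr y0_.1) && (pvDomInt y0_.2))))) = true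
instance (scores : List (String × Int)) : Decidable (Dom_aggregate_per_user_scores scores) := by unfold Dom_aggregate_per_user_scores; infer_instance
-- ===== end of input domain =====

-- B replaces the single-pass defaultdict accumulation with a worklist partition loop:
-- repeatedly emit the first remaining user's scores by one filtering pass and drop that
-- user's entries, so no dict accumulation occurs (alternative decomposition, not faster).


-- ===== PORT A =====
-- defaultdict(list); mapped_scores[name].append(val) is d.modify name [] (· ++ [val])
def aggregate_per_user_scores (scores : List (String × Int)) : List (String × List Int) :=
  (scores.foldl (fun d p => d.modify p.1 [] (· ++ [p.2])) PySem.Dict.empty).items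

-- ===== PORT B =====
-- the while-loop over `rest`; `result[name] = …` always adds a FRESH key (that name was
-- filtered out of every earlier `rest`), so the dict write is exactly an append to `acc`
def pvAggLoop : List (String × Int) → List (String × List Int) → List (String × List Int)
  | [], acc => acc
  | (n, v) :: t, acc =>
      pvAggLoop (((n, v) :: t).filter (fun q => q.1 != n))
        (acc ++ [(n, (((n, v) :: t).filter (fun q => q.1 == n)).map (·.2))])
  termination_by r _ => r.length
  decreasing_by
    simp only [List.filter_cons, bne_self_eq_false, List.length_cons]
    exact Nat.lt_succ_of_le (List.length_filter_le _ t)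

def aggregate_per_user_scores_alt (scores : List (String × Int)) : List (String × List Int) :=
  pvAggLoop scores []

-- ===== PRECONDITION & SPEC =====
def Spec_aggregate_per_user_scores (scores : List (String × Int)) (out : List (String × List Int)) : Prop := out = aggregate_per_user_scores_alt scores
instance (scores : List (String × Int)) (out : List (String × List Int)) : Decidable (Spec_aggregate_per_user_scores scores out) := by unfold Spec_aggregate_per_user_scores; infer_instance

-- ===== CLAIM (what is proved, stated in full; the proofs are below) =====
def Claim_equal_aggregate_per_user_scores : Prop := ∀ (scores : List (String × Int)), Dom_aggregate_per_user_scores scores → Spec_aggregate_per_user_scores scores (aggregate_per_user_scores scores)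

-- ===== LEMMAS AND PROOFS =====

-- set(first occurrences) commutes with filtering out one element
theorem filter_ofList_ne (l : List String) (n : String) :
    (PySem.Set.ofList l).filter (fun y => y != n) = PySem.Set.ofList (l.filter (fun y => y != n)) := by
  induction l with
  | nil => rfl
  | cons x xs ih =>
    rw [PySem.Set.ofList_cons, PySem.Set.discard]
    simp only [List.filter_cons]
    by_cases hx : x = n
    · have h1 : (x != n) = false := by simp [hx]
      rw [h1, if_neg (by simp), if_neg (by simp), List.filter_filter, ← ih]
      refine List.filter_congr fun a _ => ?_
      cases h : a == x
      · simp
      · simp [eq_of_beq h, hx]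
    · have h1 : (x != n) = true := bne_iff_ne.mpr hx
      rw [h1]
      simp only [if_true]
      rw [PySem.Set.ofList_cons, PySem.Set.discard, ← ih, List.filter_filter, List.filter_filter]
      exact congrArg (x :: ·) (List.filter_congr fun a _ => Bool.and_comm _ _)

-- the worklist loop computes: for each first-occurrence name, that name's scores
theorem pvAggLoop_spec (r : List (String × Int)) (acc : List (String × List Int)) :
    pvAggLoop r acc
      = acc ++ (PySem.Set.ofList (r.map (·.1))).map
          (fun k => (k, (r.filter (fun q => q.1 == k)).map (·.2))) := by
  induction r, acc using pvAggLoop.induct with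
  | case1 acc => simp [pvAggLoop, PySem.Set.ofList_nil]
  | case2 n v t acc ih =>
    rw [pvAggLoop, ih]
    have hhead : ((n, v) :: t).filter (fun q => q.1 != n) = t.filter (fun q => q.1 != n) := by
      simp
    have hmapf : (t.filter (fun q => q.1 != n)).map (·.1) = (t.map (·.1)).filter (fun y => y != n) := by
      rw [List.filter_map]; rfl
    rw [hhead, hmapf, ← filter_ofList_ne, List.map_cons, PySem.Set.ofList_cons, PySem.Set.discard,
      List.map_cons, List.append_assoc]
    refine congrArg (acc ++ ·) ?_
    refine congrArg₂ (fun h tl => h :: tl) (by simp) ?_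
    symm
    apply List.map_congr_left
    intro k hk
    have hkn : (k != n) = true := (List.mem_filter.mp hk).2
    have hkne : k ≠ n := bne_iff_ne.mp hkn
    have h1 : ((n, v) :: t).filter (fun q => q.1 == k) = t.filter (fun q => q.1 == k) := by
      simp [Ne.symm hkne]
    rw [h1, List.filter_filter]
    have he : t.filter (fun a => a.1 == k && a.1 != n) = t.filter (fun q => q.1 == k) :=
      List.filter_congr fun a _ => by
        cases h : a.1 == k
        · simp
        · simp [eq_of_beq h, hkn]
    rw [he]

-- ===== VERDICT (by name: the statement is the Claim_ definition above) =====
theorem aggregate_per_user_scores_spec : Claim_equal_aggregate_per_user_scores := by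
  intro scores _
  unfold Spec_aggregate_per_user_scores aggregate_per_user_scores aggregate_per_user_scores_alt
  have hnd := PySem.Dict.nodup_keys_foldl_modify_key scores (fun p => p.1) []
      (fun _ p l => l ++ [p.2]) PySem.Dict.empty (by simp)
  rw [PySem.Dict.items_eq_map_keys _ hnd ([] : List Int),
      PySem.Dict.keys_foldl_modify_key scores (fun p => p.1) [] (fun _ p l => l ++ [p.2]),
      pvAggLoop_spec, List.nil_append]
  simp only [PySem.Dict.keys_empty, PySem.Set.update_nil_left]
  apply List.map_congr_left
  intro k _
  rw [PySem.Dict.getD_foldl_modify_append, PySem.Dict.getD_empty, List.nil_append]
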